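-- pv_equiv track=rewrite | github.com/lingli-pansy/arbiter | system/tools/impl/calculate_portfolio_performance.py | _align_dates
-- ===== SOURCE A (Python) =====
-- def _align_dates(price_series: dict) -> list[str]:
--     """所有标的共有的交易日，按日期排序"""
--     if not price_series:
--         return []
--     common = None
--     for sym, dates in price_series.items():
--         s = set(dates.keys())
--         common = s if common is None else common & s
--     return sorted(common or [])
-- ===== SOURCE B (Python) =====
-- def _align_dates(price_series: dict) -> list[str]:
--     """所有标的共有的交易日，按日期排序"""
--     n = len(price_series)
--     counts = {}
--     for dates in price_series.values():
--         for d in dates: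
--             counts[d] = counts.get(d, 0) + 1
--     return sorted(d for d, c in counts.items() if c == n)
-- ===== Notes on version B (the rewrite author's own statement) =====
-- stated objective: alternative
-- what changed: Replaces the fold of pairwise set intersections with a single frequency tally of every date key across all symbols, returning sorted dates whose count equals the number of symbols.
import Mathlib
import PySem

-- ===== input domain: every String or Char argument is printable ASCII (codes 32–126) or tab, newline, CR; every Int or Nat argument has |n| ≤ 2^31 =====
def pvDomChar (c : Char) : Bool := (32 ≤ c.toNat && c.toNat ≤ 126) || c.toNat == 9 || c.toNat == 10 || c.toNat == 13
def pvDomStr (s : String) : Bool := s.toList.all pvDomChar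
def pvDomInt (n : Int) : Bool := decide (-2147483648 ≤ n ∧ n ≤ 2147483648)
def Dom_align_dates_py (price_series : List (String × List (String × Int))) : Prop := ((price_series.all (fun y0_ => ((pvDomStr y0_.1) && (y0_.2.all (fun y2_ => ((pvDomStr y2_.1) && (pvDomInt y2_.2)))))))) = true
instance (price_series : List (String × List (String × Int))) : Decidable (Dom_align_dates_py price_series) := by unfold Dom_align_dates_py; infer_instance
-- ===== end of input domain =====

-- B replaces A's fold of pairwise set intersections by one frequency tally of all date keys
-- (a date is common iff its count equals the number of symbols); alternative algorithm, same cost.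

-- ===== PORT A =====
def align_dates_py (price_series : List (String × List (String × Int))) : List String :=
  if price_series = [] then []
  else
    let common : Option (PySem.Set String) :=
      price_series.foldl
        (fun common e =>
          let s : PySem.Set String := PySem.Set.ofList (PySem.Dict.ofList e.2).keys
          match common with
          | none => some s
          | some c => some (PySem.Set.inter c s))
        none
    -- 'sorted(common or [])': None and the empty set are falsy
    PySem.List.sorted
      (match common with
       | none => []
       | some s => if s.isEmpty then [] else s)
      (fun x => x) false

-- ===== PORT B =====
def align_dates_py_alt (price_series : List (String × List (String × Int))) : List String :=
  let n : Int := price_series.length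
  let counts : PySem.Dict String Int :=
    price_series.foldl
      (fun cnt e =>
        ((PySem.Dict.ofList e.2).keys).foldl
          (fun c d => c.insert d (c.getD d 0 + 1)) cnt)
      PySem.Dict.empty
  PySem.List.sorted ((counts.items.filter (fun p => p.2 == n)).map (·.1)) (fun x => x) false

-- ===== PRECONDITION & SPEC =====
def Spec_align_dates_py (price_series : List (String × List (String × Int))) (out : List String) : Prop := out = align_dates_py_alt price_series
instance (price_series : List (String × List (String × Int))) (out : List String) : Decidable (Spec_align_dates_py price_series out) := by unfold Spec_align_dates_py; infer_instance

-- ===== CLAIM (what is proved, stated in full; the proofs are below) =====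
def Claim_equal_align_dates_py : Prop := ∀ (price_series : List (String × List (String × Int))), Dom_align_dates_py price_series → Spec_align_dates_py price_series (align_dates_py price_series)

-- ===== LEMMAS AND PROOFS =====

-- the per-symbol key list and the concatenation of all of them
def pvKeysOf (e : String × List (String × Int)) : List String := (PySem.Dict.ofList e.2).keys
def pvFlat (l : List (String × List (String × Int))) : List String := l.flatMap pvKeysOf

-- A's Option-valued fold, seeded with a set, is the plain intersection fold
theorem pvFoldSome (l : List (String × List (String × Int))) (s : PySem.Set String) :
    l.foldl
      (fun common e =>
        match common with
        | none => some (PySem.Set.ofList (PySem.Dict.ofList e.2).keys)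
        | some c => some (PySem.Set.inter c (PySem.Set.ofList (PySem.Dict.ofList e.2).keys)))
      (some s)
    = some (l.foldl (fun c e => PySem.Set.inter c (PySem.Set.ofList (pvKeysOf e))) s) := by
  induction l generalizing s with
  | nil => rfl
  | cons h t ih => simpa [pvKeysOf] using ih _

theorem pvMemInterFold (l : List (String × List (String × Int))) (s : PySem.Set String) (x : String) :
    x ∈ l.foldl (fun c e => PySem.Set.inter c (PySem.Set.ofList (pvKeysOf e))) s
      ↔ x ∈ s ∧ ∀ e ∈ l, x ∈ pvKeysOf e := by
  induction l generalizing s with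
  | nil => simp
  | cons h t ih =>
    simp only [List.foldl_cons, ih, PySem.Set.mem_inter, PySem.Set.mem_ofList, List.mem_cons]
    constructor
    · rintro ⟨⟨hs, hk⟩, hall⟩
      exact ⟨hs, fun e he => he.elim (fun h' => h' ▸ hk) (hall e)⟩
    · rintro ⟨hs, hall⟩
      exact ⟨⟨hs, hall h (Or.inl rfl)⟩, fun e he => hall e (Or.inr he)⟩

theorem pvNodupInterFold (l : List (String × List (String × Int))) (s : PySem.Set String)
    (hs : s.Nodup) :
    (l.foldl (fun c e => PySem.Set.inter c (PySem.Set.ofList (pvKeysOf e))) s).Nodup := by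
  induction l generalizing s with
  | nil => exact hs
  | cons h t ih => exact ih _ (PySem.Set.nodup_inter _ _ hs)

-- counting lemma: a key's multiplicity in the concatenation is at most the number of symbols,
-- with equality exactly when every symbol's dict contains it
theorem pvCount (x : String) (l : List (String × List (String × Int))) :
    (pvFlat l).count x ≤ l.length ∧ ((pvFlat l).count x = l.length ↔ ∀ e ∈ l, x ∈ pvKeysOf e) := by
  induction l with
  | nil => simp [pvFlat]
  | cons h t ih =>
    have hsplit : (pvFlat (h :: t)).count x = (pvKeysOf h).count x + (pvFlat t).count x := by
      simp [pvFlat, List.flatMap_cons, List.count_append]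
    have hnd : (pvKeysOf h).Nodup := PySem.Dict.nodup_keys_ofList _
    by_cases hx : x ∈ pvKeysOf h
    · have h1 : (pvKeysOf h).count x = 1 := List.count_eq_one_of_mem hnd hx
      constructor
      · simp only [hsplit, h1, List.length_cons]; omega
      · constructor
        · intro heq e he
          rcases List.mem_cons.mp he with rfl | he'
          · exact hx
          · have : (pvFlat t).count x = t.length := by
              simp only [hsplit, h1, List.length_cons] at heq; omega
            exact (ih.2.mp this) e he'
        · intro hall
          have : (pvFlat t).count x = t.length := ih.2.mpr (fun e he => hall e (List.mem_cons_of_mem _ he))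
          simp only [hsplit, h1, this, List.length_cons]; omega
    · have h0 : (pvKeysOf h).count x = 0 := List.count_eq_zero_of_not_mem hx
      constructor
      · simp only [hsplit, h0, List.length_cons]; omega
      · constructor
        · intro heq
          exfalso
          have := ih.1
          simp only [hsplit, h0, List.length_cons] at heq; omega
        · intro hall; exact absurd (hall h (List.mem_cons_self)) hx

-- B's pre-sort list, in closed form
theorem pvAltList (ps : List (String × List (String × Int))) :
    ((ps.foldl
        (fun cnt e =>
          ((PySem.Dict.ofList e.2).keys).foldl
            (fun c d => c.insert d (c.getD d 0 + 1)) cnt)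
        PySem.Dict.empty).items.filter (fun p => p.2 == (ps.length : Int))).map (·.1)
    = (PySem.Set.ofList (pvFlat ps)).filter
        (fun k => ((pvFlat ps).count k : Int) == (ps.length : Int)) := by
  have hc : ps.foldl
      (fun cnt e =>
        ((PySem.Dict.ofList e.2).keys).foldl
          (fun c d => c.insert d (c.getD d 0 + 1)) cnt)
      (PySem.Dict.empty : PySem.Dict String Int)
      = (pvFlat ps).foldl (fun c d => c.insert d (c.getD d 0 + 1)) PySem.Dict.empty := by
    rw [pvFlat, List.foldl_flatMap]; rfl
  rw [hc, PySem.Dict.foldl_insert_getD_add_one_eq_counter, PySem.Dict.items_counter,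
    List.filter_map, List.map_map]
  simp [Function.comp_def]

-- 'common or []' is the identity up to the value sorted sees
theorem pvTruthy (s : PySem.Set String) :
    (if s.isEmpty then ([] : List String) else s) = s := by
  cases s <;> simp

-- ===== VERDICT (by name: the statement is the Claim_ definition above) =====
theorem align_dates_py_spec : Claim_equal_align_dates_py := by
  intro ps _
  unfold Spec_align_dates_py
  cases ps with
  | nil => rfl
  | cons h t =>
    have hA : align_dates_py (h :: t)
        = PySem.List.sorted
            (t.foldl (fun c e => PySem.Set.inter c (PySem.Set.ofList (pvKeysOf e)))
              (PySem.Set.ofList (pvKeysOf h)))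
            (fun x => x) false := by
      unfold align_dates_py
      rw [if_neg (List.cons_ne_nil h t)]
      simp only [List.foldl_cons]
      rw [pvFoldSome]
      simp only [pvKeysOf, pvTruthy]
    have hB : align_dates_py_alt (h :: t)
        = PySem.List.sorted
            ((PySem.Set.ofList (pvFlat (h :: t))).filter
              (fun k => ((pvFlat (h :: t)).count k : Int) == (((h :: t).length : Nat) : Int)))
            (fun x => x) false := by
      simp only [align_dates_py_alt]
      rw [pvAltList]
    rw [hA, hB]
    apply PySem.List.sorted_eq_sorted_of_perm _ _ _ (fun a b hh => hh)
    refine (List.perm_ext_iff_of_nodup ?_ ?_).mpr ?_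
    · exact pvNodupInterFold _ _ (PySem.Set.nodup_ofList _)
    · exact (PySem.Set.nodup_ofList _).filter _
    · intro x
      rw [pvMemInterFold]
      simp only [List.mem_filter, PySem.Set.mem_ofList, beq_iff_eq, Int.natCast_inj,
        PySem.Set.mem_ofList]
      constructor
      · rintro ⟨hs0, hall⟩
        have hall' : ∀ e ∈ h :: t, x ∈ pvKeysOf e := by
          intro e he
          rcases List.mem_cons.mp he with rfl | he'
          · exact hs0
          · exact hall e he'
        refine ⟨?_, (pvCount x (h :: t)).2.mpr hall'⟩
        exact List.mem_flatMap.mpr ⟨h, List.mem_cons_self, hs0⟩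
      · rintro ⟨hmem, hcnt⟩
        have hall := (pvCount x (h :: t)).2.mp hcnt
        exact ⟨hall h List.mem_cons_self, fun e he => hall e (List.mem_cons_of_mem _ he)⟩
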